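-- pv_equiv track=rewrite | github.com/Xuskia11/Leaderhood_exams | Codewars/Play with two Strings.py | work_on_strings
-- ===== SOURCE A (Python) =====
-- def work_on_strings(a,b):
--     list1 = list(a)
--     list2 = list(b)
--     for i in range(len(a)):
--         for x in range(len(b)):
--             if list1[i].upper() == list2[x] or  list1[i].lower() == list2[x]:
--                 list2[x] = list2[x].swapcase()
--
--     for x in range(len(b)):
--         for i in range(len(a)):
--             if list2[x].upper() == list1[i] or list2[x].lower() == list1[i]:
--                 list1[i] = list1[i].swapcase()
--     return "".join(list1 + list2)
-- ===== SOURCE B (Python) =====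
-- def work_on_strings(a, b):
--     ca = {}
--     for ch in a:
--         k = ch.lower()
--         ca[k] = ca.get(k, 0) + 1
--     cb = {}
--     for ch in b:
--         k = ch.lower()
--         cb[k] = cb.get(k, 0) + 1
--     na = ''.join(ch.swapcase() if cb.get(ch.lower(), 0) % 2 else ch for ch in a)
--     nb = ''.join(ch.swapcase() if ca.get(ch.lower(), 0) % 2 else ch for ch in b)
--     return na + nb
-- ===== Notes on version B (the rewrite author's own statement) =====
-- stated objective: faster
-- what changed: A runs two nested index loops that swapcase a character once per case-insensitive match; B builds one case-insensitive count dictionary per string and toggles each character's case by the parity of its match count, in a single pass per string.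
import Mathlib
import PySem

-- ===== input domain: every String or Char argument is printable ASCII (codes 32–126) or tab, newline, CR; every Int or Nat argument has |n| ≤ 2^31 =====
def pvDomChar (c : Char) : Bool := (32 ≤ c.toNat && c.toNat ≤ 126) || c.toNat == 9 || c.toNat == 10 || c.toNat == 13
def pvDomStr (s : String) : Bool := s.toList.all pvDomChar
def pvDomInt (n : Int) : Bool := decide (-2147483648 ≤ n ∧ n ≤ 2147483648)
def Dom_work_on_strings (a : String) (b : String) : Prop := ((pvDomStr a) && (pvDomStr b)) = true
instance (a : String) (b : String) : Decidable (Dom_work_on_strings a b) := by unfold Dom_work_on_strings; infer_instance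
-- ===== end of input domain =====

-- B replaces A's two quadratic index-nested swap loops by one case-insensitive count per string,
-- toggling each character by the parity of its matches (objective: faster).

-- shared primitive helper: Python's str.swapcase() on one character (exact on ASCII)
def pvSwapChar (c : Char) : Char :=
  if PySem.Chars.isupper c then PySem.Chars.lowerChar c
  else if PySem.Chars.islower c then PySem.Chars.upperChar c
  else c

-- ===== PORT A =====
-- A's match test `list1[i].upper() == list2[x] or list1[i].lower() == list2[x]` (exact on ASCII)
def pvCondA (d c : Char) : Bool :=
  (PySem.Chars.upperChar d == c) || (PySem.Chars.lowerChar d == c)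

-- literal transliteration of A; every index lies in range, so `getD _ ' '` is Python's
-- exact (never-failing) list indexing here.
def work_on_strings (a : String) (b : String) : String :=
  let list1 := a.toList
  let list2 := b.toList
  let list2' := (List.range list1.length).foldl (fun l2 i =>
      (List.range l2.length).foldl (fun l2 x =>
        if pvCondA (list1.getD i ' ') (l2.getD x ' ')
        then l2.set x (pvSwapChar (l2.getD x ' ')) else l2) l2) list2
  let list1' := (List.range list2'.length).foldl (fun l1 x =>
      (List.range l1.length).foldl (fun l1 i =>
        if pvCondA (list2'.getD x ' ') (l1.getD i ' ')
        then l1.set i (pvSwapChar (l1.getD i ' ')) else l1) l1) list1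
  String.mk (list1' ++ list2')

-- ===== PORT B =====
def work_on_strings_alt (a : String) (b : String) : String :=
  let la := a.toList
  let lb := b.toList
  let ca := la.foldl (fun d ch =>
      d.insert (PySem.Chars.lowerChar ch) (d.getD (PySem.Chars.lowerChar ch) 0 + 1))
      (PySem.Dict.empty : PySem.Dict Char Int)
  let cb := lb.foldl (fun d ch =>
      d.insert (PySem.Chars.lowerChar ch) (d.getD (PySem.Chars.lowerChar ch) 0 + 1))
      (PySem.Dict.empty : PySem.Dict Char Int)
  let na := la.map (fun ch =>
      if PySem.Int.mod (cb.getD (PySem.Chars.lowerChar ch) 0) 2 ≠ 0 then pvSwapChar ch else ch)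
  let nb := lb.map (fun ch =>
      if PySem.Int.mod (ca.getD (PySem.Chars.lowerChar ch) 0) 2 ≠ 0 then pvSwapChar ch else ch)
  String.mk (na ++ nb)

-- ===== PRECONDITION & SPEC =====
def Spec_work_on_strings (a : String) (b : String) (out : String) : Prop := out = work_on_strings_alt a b
instance (a : String) (b : String) (out : String) : Decidable (Spec_work_on_strings a b out) := by unfold Spec_work_on_strings; infer_instance

-- ===== CLAIM (what is proved, stated in full; the proofs are below) =====
def Claim_equal_work_on_strings : Prop := ∀ (a : String) (b : String), Dom_work_on_strings a b → Spec_work_on_strings a b (work_on_strings a b)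

-- ===== LEMMAS AND PROOFS =====

-- character-level facts, checked exhaustively over the 128 ASCII codes
lemma pv_aux_key_swap : ∀ n : Nat, n < 128 →
    PySem.Chars.lowerChar (pvSwapChar (Char.ofNat n)) = PySem.Chars.lowerChar (Char.ofNat n) := by
  decide

lemma pv_aux_swap_swap : ∀ n : Nat, n < 128 →
    pvSwapChar (pvSwapChar (Char.ofNat n)) = Char.ofNat n := by
  decide

lemma pv_aux_swap_lt : ∀ n : Nat, n < 128 → (pvSwapChar (Char.ofNat n)).toNat < 128 := by
  decide

set_option maxHeartbeats 1000000 in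
set_option maxRecDepth 16384 in
lemma pv_aux_cond_key : ∀ n : Nat, n < 128 → ∀ m : Nat, m < 128 →
    pvCondA (Char.ofNat n) (Char.ofNat m)
      = (PySem.Chars.lowerChar (Char.ofNat n) == PySem.Chars.lowerChar (Char.ofNat m)) := by
  decide

lemma pv_key_swap (c : Char) (h : c.toNat < 128) :
    PySem.Chars.lowerChar (pvSwapChar c) = PySem.Chars.lowerChar c := by
  have := pv_aux_key_swap c.toNat h
  rwa [Char.ofNat_toNat] at this

lemma pv_swap_swap (c : Char) (h : c.toNat < 128) : pvSwapChar (pvSwapChar c) = c := by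
  have := pv_aux_swap_swap c.toNat h
  rwa [Char.ofNat_toNat] at this

lemma pv_swap_lt (c : Char) (h : c.toNat < 128) : (pvSwapChar c).toNat < 128 := by
  have := pv_aux_swap_lt c.toNat h
  rwa [Char.ofNat_toNat] at this

lemma pv_cond_key (d c : Char) (hd : d.toNat < 128) (hc : c.toNat < 128) :
    pvCondA d c = (PySem.Chars.lowerChar d == PySem.Chars.lowerChar c) := by
  have := pv_aux_cond_key d.toNat hd c.toNat hc
  rwa [Char.ofNat_toNat, Char.ofNat_toNat] at this

lemma pv_dom_lt (c : Char) (h : pvDomChar c = true) : c.toNat < 128 := by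
  unfold pvDomChar at h
  simp only [Bool.or_eq_true, Bool.and_eq_true, decide_eq_true_eq, beq_iff_eq] at h
  omega

-- A's inner index loop is a pointwise map
lemma pv_inner_loop (p : Char → Bool) (f : Char → Char) :
    ∀ (n : Nat) (l : List Char), n ≤ l.length →
    (List.range n).foldl (fun l x => if p (l.getD x ' ') then l.set x (f (l.getD x ' ')) else l) l
      = (l.take n).map (fun c => if p c then f c else c) ++ l.drop n := by
  intro n
  induction n with
  | zero => intro l _; simp
  | succ n ih =>
    intro l hn
    have hn' : n ≤ l.length := Nat.le_of_succ_le hn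
    have hlt : n < l.length := hn
    rw [List.range_succ, List.foldl_append, ih l hn']
    set g : Char → Char := fun c => if p c = true then f c else c with hg
    have hlen : ((l.take n).map g).length = n := by
      simp [List.length_take, Nat.min_eq_left hn']
    have hget : ((l.take n).map g ++ l.drop n).getD n ' ' = l[n] := by
      rw [List.getD_eq_getElem?_getD, List.getElem?_append_right (by omega), hlen]
      rw [List.getElem?_drop, Nat.sub_self, Nat.add_zero, List.getElem?_eq_getElem hlt]; rfl
    have hdrop : l.drop n = l[n] :: l.drop (n+1) := List.drop_eq_getElem_cons hlt
    have htake : (l.take (n+1)).map g = (l.take n).map g ++ [g l[n]] := by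
      rw [List.take_add_one, List.getElem?_eq_getElem hlt, Option.toList_some, List.map_append]; rfl
    simp only [List.foldl_cons, List.foldl_nil, hget]
    by_cases hp : p l[n]
    · rw [if_pos hp, List.set_append_right _ _ (by omega), hlen, Nat.sub_self, hdrop,
        List.set_cons_zero, htake]
      have : g l[n] = f l[n] := by rw [hg]; simp [hp]
      rw [this, List.append_assoc, List.singleton_append]
    · rw [if_neg hp, htake, hdrop]
      have : g l[n] = l[n] := by rw [hg]; simp [hp]
      rw [this, List.append_assoc, List.singleton_append]

-- folding over the indices of a fixed list is folding over its elements
lemma pv_foldl_range_getD {σ : Type} (h : σ → Char → σ) :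
    ∀ (l : List Char) (s : σ),
    (List.range l.length).foldl (fun s i => h s (l.getD i ' ')) s = l.foldl h s := by
  intro l
  induction l with
  | nil => intro s; simp
  | cons x xs ih =>
    intro s
    simp only [List.length_cons, List.range_succ_eq_map, List.foldl_cons, List.foldl_map,
      List.getD_cons_zero, List.getD_cons_succ]
    exact ih (h s x)

-- a fold of maps is a map of the flipped fold
lemma pv_foldl_map_comm (g : Char → Char → Char) :
    ∀ (ds l : List Char),
    ds.foldl (fun l d => l.map (g d)) l = l.map (fun c => ds.foldl (fun c d => g d c) c) := by
  intro ds
  induction ds with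
  | nil => intro l; simp
  | cons d ds ih =>
    intro l
    simp only [List.foldl_cons, ih, List.map_map]
    rfl

-- the repeated conditional swap reduces to the parity of case-insensitive matches
lemma pv_parity : ∀ (ds : List Char), (∀ d ∈ ds, d.toNat < 128) →
    ∀ (c : Char), c.toNat < 128 →
    ds.foldl (fun c d => if pvCondA d c then pvSwapChar c else c) c
      = if (ds.countP (fun d => PySem.Chars.lowerChar d == PySem.Chars.lowerChar c)) % 2 = 1
        then pvSwapChar c else c := by
  intro ds
  induction ds with
  | nil => intro _ c _; simp
  | cons d ds ih =>
    intro hds c hc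
    have hd : d.toNat < 128 := hds d (List.mem_cons_self)
    have hds' : ∀ x ∈ ds, x.toNat < 128 := fun x hx => hds x (List.mem_cons_of_mem d hx)
    simp only [List.foldl_cons, List.countP_cons, pv_cond_key d c hd hc]
    by_cases hk : PySem.Chars.lowerChar d = PySem.Chars.lowerChar c
    · have hbeq : (PySem.Chars.lowerChar d == PySem.Chars.lowerChar c) = true := by simp [hk]
      rw [hbeq, if_pos rfl, ih hds' (pvSwapChar c) (pv_swap_lt c hc)]
      have hcnt : ds.countP (fun d => PySem.Chars.lowerChar d == PySem.Chars.lowerChar (pvSwapChar c))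
          = ds.countP (fun d => PySem.Chars.lowerChar d == PySem.Chars.lowerChar c) := by
        rw [pv_key_swap c hc]
      rw [hcnt, pv_swap_swap c hc]
      simp only [if_true]
      set m := ds.countP (fun d => PySem.Chars.lowerChar d == PySem.Chars.lowerChar c) with hm
      rcases Nat.even_or_odd m with he | ho
      · have h1 : m % 2 = 0 := Nat.even_iff.mp he
        have h2 : (m + 1) % 2 = 1 := by omega
        rw [if_neg (by omega), if_pos h2]
      · have h1 : m % 2 = 1 := Nat.odd_iff.mp ho
        have h2 : (m + 1) % 2 ≠ 1 := by omega
        rw [if_pos h1, if_neg h2]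
    · have hbeq : (PySem.Chars.lowerChar d == PySem.Chars.lowerChar c) = false := by simp [hk]
      rw [hbeq, if_neg (by simp), ih hds' c hc]
      simp

-- one of A's double loops (outer over ds's indices, inner over l's positions) in closed form
lemma pv_phase (ds l : List Char) (hds : ∀ d ∈ ds, d.toNat < 128) (hl : ∀ c ∈ l, c.toNat < 128) :
    (List.range ds.length).foldl (fun l i =>
      (List.range l.length).foldl (fun l x =>
        if pvCondA (ds.getD i ' ') (l.getD x ' ')
        then l.set x (pvSwapChar (l.getD x ' ')) else l) l) l
    = l.map (fun c =>
        if (ds.countP (fun d => PySem.Chars.lowerChar d == PySem.Chars.lowerChar c)) % 2 = 1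
        then pvSwapChar c else c) := by
  have hbody : (fun (l : List Char) (i : Nat) =>
      (List.range l.length).foldl (fun l x =>
        if pvCondA (ds.getD i ' ') (l.getD x ' ')
        then l.set x (pvSwapChar (l.getD x ' ')) else l) l)
      = (fun (l : List Char) (i : Nat) =>
          l.map (fun c => if pvCondA (ds.getD i ' ') c then pvSwapChar c else c)) := by
    funext l i
    rw [pv_inner_loop (pvCondA (ds.getD i ' ')) pvSwapChar l.length l (le_refl _)]
    simp
  rw [hbody,
    pv_foldl_range_getD (fun l d => l.map (fun c => if pvCondA d c then pvSwapChar c else c)) ds l,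
    pv_foldl_map_comm (fun d c => if pvCondA d c then pvSwapChar c else c) ds l]
  exact List.map_congr_left (fun c hc => pv_parity ds hds c (hl c hc))

-- B's hand-rolled counting loop is Counter, i.e. countP of the lower-cased key
lemma pv_bcount (l : List Char) (k : Char) :
    (l.foldl (fun d ch =>
        d.insert (PySem.Chars.lowerChar ch) (d.getD (PySem.Chars.lowerChar ch) 0 + 1))
        (PySem.Dict.empty : PySem.Dict Char Int)).getD k 0
      = ((l.countP (fun d => PySem.Chars.lowerChar d == k) : Nat) : Int) := by
  have h1 : l.foldl (fun d ch =>
        d.insert (PySem.Chars.lowerChar ch) (d.getD (PySem.Chars.lowerChar ch) 0 + 1))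
        (PySem.Dict.empty : PySem.Dict Char Int)
      = (l.map PySem.Chars.lowerChar).foldl (fun d x => d.insert x (d.getD x 0 + 1))
        (PySem.Dict.empty : PySem.Dict Char Int) := by
    rw [List.foldl_map]
  rw [h1, PySem.Dict.foldl_insert_getD_add_one_eq_counter, PySem.Dict.getD_counter,
    List.count_eq_countP, List.countP_map]
  rfl

-- B's truthiness test `count % 2` as the parity condition
lemma pv_bcond (l : List Char) (c : Char) :
    (PySem.Int.mod ((l.foldl (fun d ch =>
        d.insert (PySem.Chars.lowerChar ch) (d.getD (PySem.Chars.lowerChar ch) 0 + 1))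
        (PySem.Dict.empty : PySem.Dict Char Int)).getD (PySem.Chars.lowerChar c) 0) 2 ≠ 0)
      ↔ (l.countP (fun d => PySem.Chars.lowerChar d == PySem.Chars.lowerChar c)) % 2 = 1 := by
  rw [pv_bcount]
  set n := l.countP (fun d => PySem.Chars.lowerChar d == PySem.Chars.lowerChar c) with hn
  have h2 : PySem.Int.mod ((n : Nat) : Int) 2 = ((n % 2 : Nat) : Int) := by
    exact_mod_cast PySem.Int.mod_natCast n 2
  rw [h2]
  constructor
  · intro h; omega
  · intro h; omega

theorem pv_main (a b : String)
    (ha : ∀ c ∈ a.toList, c.toNat < 128) (hb : ∀ c ∈ b.toList, c.toNat < 128) :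
    work_on_strings a b = work_on_strings_alt a b := by
  simp only [work_on_strings, work_on_strings_alt]
  set la := a.toList
  set lb := b.toList
  set key := PySem.Chars.lowerChar with hkey
  rw [pv_phase la lb ha hb]
  set h0 : Char → Char := fun c => if (la.countP (fun d => key d == key c)) % 2 = 1
      then pvSwapChar c else c with hh0
  have hlb' : ∀ c ∈ lb.map h0, c.toNat < 128 := by
    intro c hc
    rcases List.mem_map.mp hc with ⟨d, hd, rfl⟩
    have := hb d hd
    rw [hh0]
    dsimp only
    split
    · exact pv_swap_lt d this
    · exact this
  have hp2 := pv_phase (lb.map h0) la hlb' ha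
  rw [List.length_map] at hp2
  rw [List.length_map, hp2]
  have hcnt : ∀ k : Char, (lb.map h0).countP (fun d => key d == k)
      = lb.countP (fun d => key d == k) := by
    intro k
    rw [List.countP_map]
    apply List.countP_congr
    intro d hd
    have h128 := hb d hd
    simp only [Function.comp]
    rw [hh0]
    dsimp only
    split
    · rw [hkey, pv_key_swap d h128]
    · rfl
  congr 1
  congr 1
  · apply List.map_congr_left
    intro c hc
    rw [hcnt (key c)]
    rw [if_congr (Iff.symm (pv_bcond lb c)) rfl rfl]
  · apply List.map_congr_left
    intro c hc
    rw [hh0]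
    dsimp only
    rw [if_congr (Iff.symm (pv_bcond la c)) rfl rfl]

-- ===== VERDICT (by name: the statement is the Claim_ definition above) =====
theorem work_on_strings_spec : Claim_equal_work_on_strings := by
  intro a b hDom
  unfold Spec_work_on_strings
  have hDom' := hDom
  unfold Dom_work_on_strings pvDomStr at hDom'
  simp only [Bool.and_eq_true, List.all_eq_true] at hDom'
  obtain ⟨ha, hb⟩ := hDom'
  exact pv_main a b (fun c hc => pv_dom_lt c (ha c hc)) (fun c hc => pv_dom_lt c (hb c hc))
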